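-- pv_equiv track=rewrite | github.com/huikinglam02gmail/Leetcode_solutions | 3582.generate-tag-for-video-caption.py | generateTag
-- ===== SOURCE A (Python) =====
-- def generateTag(caption: str) -> str:
--     captionSplit = caption.lstrip(" ").rstrip(" ").split(" ")
--     result = "#"
--     for i, s in enumerate(captionSplit):
--         for j in range(len(s)):
--             if s[j].isalpha():
--                 if i > 0 and j == 0:
--                     result += s[j].upper()
--                 else:
--                     result += s[j].lower()
--                 if len(result) >= 100: return result
--     return result
-- ===== SOURCE B (Python) =====
-- def generateTag(caption: str) -> str:
--     # One streaming pass over the raw characters: no strip, no split, no word list.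
--     # An alphabetic char is uppercased exactly when it directly follows a space
--     # that itself comes after some earlier non-space char (= position 0 of a
--     # non-first word in A's stripped/split view); stop as soon as 100 chars built.
--     out = ["#"]
--     seen_word = False     # some non-space char has occurred
--     after_space = False   # previous char was ' ' and a word was seen before it
--     for c in caption:
--         if c == ' ':
--             after_space = seen_word
--         else:
--             if c.isalpha():
--                 out.append(c.upper() if after_space else c.lower())
--                 if len(out) == 100:
--                     break
--             seen_word = True
--             after_space = False
--     return "".join(out)
-- ===== Notes on version B (the rewrite author's own statement) =====
-- stated objective: alternative
-- what changed: Replaces strip/split into words plus a nested per-word character loop by one streaming state machine over the raw characters (two booleans track 'a word was seen' and 'previous char was a separating space'), which decides capitalization locally with no word list ever built.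
import Mathlib
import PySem

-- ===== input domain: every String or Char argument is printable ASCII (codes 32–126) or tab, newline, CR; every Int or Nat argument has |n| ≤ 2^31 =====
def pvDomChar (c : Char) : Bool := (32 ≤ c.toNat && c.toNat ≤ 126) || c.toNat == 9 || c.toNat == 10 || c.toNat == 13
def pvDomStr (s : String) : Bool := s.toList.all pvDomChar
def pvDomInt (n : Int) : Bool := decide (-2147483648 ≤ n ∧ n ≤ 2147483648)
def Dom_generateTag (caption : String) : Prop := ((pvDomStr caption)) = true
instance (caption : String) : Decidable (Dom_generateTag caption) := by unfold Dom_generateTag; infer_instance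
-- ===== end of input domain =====

-- B replaces A's strip/split-into-words plus nested per-word loop by a single streaming state
-- machine over the raw characters (two booleans), never building a word list (objective: alternative).

-- ===== PORT A =====
-- caption.lstrip(" "): drop leading space characters (exact: only ' ' is stripped)
def pvLstripSp (cs : List Char) : List Char := cs.dropWhile (· == ' ')
-- .rstrip(" "): drop trailing space characters (exact: only ' ' is stripped)
def pvRstripSp (cs : List Char) : List Char := (cs.reverse.dropWhile (· == ' ')).reverse

-- inner 'for j in range(len(s))' loop; Bool = an early 'return' fired
def pvInnerA (i : Int) (s : List Char) (j : Nat) (result : List Char) : List Char × Bool :=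
  match s with
  | [] => (result, false)
  | c :: rest =>
    if PySem.Chars.isalpha c then
      let result' := result ++ [if 0 < i ∧ j = 0 then PySem.Chars.upperChar c else PySem.Chars.lowerChar c]
      if 100 ≤ result'.length then (result', true)
      else pvInnerA i rest (j + 1) result'
    else pvInnerA i rest (j + 1) result

-- outer 'for i, s in enumerate(captionSplit)' loop
def pvOuterA (ws : List (Int × List Char)) (result : List Char) : List Char :=
  match ws with
  | [] => result
  | (i, s) :: rest =>
    let r := pvInnerA i s 0 result
    if r.2 then r.1 else pvOuterA rest r.1

def generateTag (caption : String) : String :=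
  let captionSplit := PySem.Chars.splitOn (pvRstripSp (pvLstripSp caption.toList)) [' ']
  String.ofList (pvOuterA (PySem.List.enumerate captionSplit 0) ['#'])

-- ===== PORT B =====
-- the 'for c in caption' state machine: out, seen_word, after_space; 'break' at len 100
def pvLoopB (cs : List Char) (out : List Char) (seen after : Bool) : List Char :=
  match cs with
  | [] => out
  | c :: rest =>
    if c = ' ' then pvLoopB rest out seen seen
    else if PySem.Chars.isalpha c then
      let out' := out ++ [if after then PySem.Chars.upperChar c else PySem.Chars.lowerChar c]
      if out'.length = 100 then out' else pvLoopB rest out' true false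
    else pvLoopB rest out true false

def generateTag_alt (caption : String) : String :=
  String.ofList (pvLoopB caption.toList ['#'] false false)

-- ===== PRECONDITION & SPEC =====
def Spec_generateTag (caption : String) (out : String) : Prop := out = generateTag_alt caption
instance (caption : String) (out : String) : Decidable (Spec_generateTag caption out) := by unfold Spec_generateTag; infer_instance

-- ===== CLAIM (what is proved, stated in full; the proofs are below) =====
def Claim_equal_generateTag : Prop := ∀ (caption : String), Dom_generateTag caption → Spec_generateTag caption (generateTag caption)

-- ===== LEMMAS AND PROOFS =====

-- "all alphabetic chars, lowercased"
def pvFrag (w : List Char) : List Char := (w.filter PySem.Chars.isalpha).map PySem.Chars.lowerChar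

-- the characters A's inner loop appends for word s, entered at position j
def pvFragAux (i : Int) (j : Nat) (s : List Char) : List Char :=
  match s with
  | [] => []
  | c :: rest =>
    if PySem.Chars.isalpha c then
      (if 0 < i ∧ j = 0 then PySem.Chars.upperChar c else PySem.Chars.lowerChar c) :: pvFragAux i (j + 1) rest
    else pvFragAux i (j + 1) rest

theorem pvFragAux_succ (i : Int) (s : List Char) : ∀ j : Nat, pvFragAux i (j + 1) s = pvFrag s := by
  induction s with
  | nil => intro j; rfl
  | cons c rest ih =>
    intro j
    simp only [pvFragAux, pvFrag]
    by_cases h : PySem.Chars.isalpha c = true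
    · simp [h, ih (j + 1), pvFrag]
    · simp [h, ih (j + 1), pvFrag]

theorem pvInnerA_eq (i : Int) (s : List Char) : ∀ (j : Nat) (result : List Char),
    result.length < 100 →
    pvInnerA i s j result =
      ((result ++ pvFragAux i j s).take 100,
       decide (100 ≤ result.length + (pvFragAux i j s).length)) := by
  induction s with
  | nil =>
    intro j result hr
    simp [pvInnerA, pvFragAux, List.take_of_length_le (Nat.le_of_lt hr), Nat.not_le.mpr hr]
  | cons c rest ih =>
    intro j result hr
    by_cases ha : PySem.Chars.isalpha c = true
    · simp only [pvInnerA, pvFragAux, ha, if_pos]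
      set ch := if 0 < i ∧ j = 0 then PySem.Chars.upperChar c else PySem.Chars.lowerChar c with hch
      by_cases hd : 100 ≤ (result ++ [ch]).length
      · have hlen : (result ++ [ch]).length = 100 := by simp at hd ⊢; omega
        rw [if_pos hd]
        have htake : ((result ++ ch :: pvFragAux i (j + 1) rest).take 100) = result ++ [ch] := by
          have : result ++ ch :: pvFragAux i (j + 1) rest = (result ++ [ch]) ++ pvFragAux i (j + 1) rest := by
            simp
          rw [this, List.take_append_of_le_length (by omega), List.take_of_length_le (by omega)]
        have hdec : decide (100 ≤ result.length + (ch :: pvFragAux i (j + 1) rest).length) = true := by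
          rw [decide_eq_true_eq]
          simp only [List.length_append, List.length_cons, List.length_nil] at hlen ⊢
          omega
        rw [htake, hdec]
      · rw [if_neg hd]
        rw [ih (j + 1) (result ++ [ch]) (by omega)]
        have hassoc : (result ++ [ch]) ++ pvFragAux i (j + 1) rest = result ++ ch :: pvFragAux i (j + 1) rest := by
          simp
        rw [hassoc]
        have hlen2 : (result ++ [ch]).length + (pvFragAux i (j + 1) rest).length
             = result.length + (ch :: pvFragAux i (j + 1) rest).length := by
          simp only [List.length_append, List.length_cons, List.length_nil]
          omega
        rw [hlen2]
    · simp only [pvInnerA, pvFragAux, ha]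
      simp only [Bool.false_eq_true, if_false]
      exact ih (j + 1) result hr

theorem pvOuterA_eq (ws : List (Int × List Char)) : ∀ result : List Char,
    result.length < 100 →
    pvOuterA ws result = (result ++ ws.flatMap (fun p => pvFragAux p.1 0 p.2)).take 100 := by
  induction ws with
  | nil =>
    intro result hr
    simp [pvOuterA, List.take_of_length_le (Nat.le_of_lt hr)]
  | cons p rest ih =>
    intro result hr
    obtain ⟨i, w⟩ := p
    simp only [pvOuterA, pvInnerA_eq i w 0 result hr, List.flatMap_cons]
    by_cases hd : 100 ≤ result.length + (pvFragAux i 0 w).length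
    · rw [if_pos (by simpa using hd)]
      have hre : result ++ (pvFragAux i 0 w ++ rest.flatMap (fun p => pvFragAux p.1 0 p.2))
           = (result ++ pvFragAux i 0 w) ++ rest.flatMap (fun p => pvFragAux p.1 0 p.2) := by simp
      rw [hre]
      exact (List.take_append_of_le_length (by simp only [List.length_append]; omega)).symm
    · rw [if_neg (by simpa using hd)]
      have hlt : (result ++ pvFragAux i 0 w).length < 100 := by simp; omega
      rw [List.take_of_length_le (Nat.le_of_lt hlt), ih _ hlt]
      simp

-- ---- B side: the emitted stream of the state machine, ignoring the 100 cap ----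
def pvEmit (cs : List Char) (seen after : Bool) : List Char :=
  match cs with
  | [] => []
  | c :: rest =>
    if c = ' ' then pvEmit rest seen seen
    else if PySem.Chars.isalpha c then
      (if after then PySem.Chars.upperChar c else PySem.Chars.lowerChar c) :: pvEmit rest true false
    else pvEmit rest true false

theorem pvLoopB_eq (cs : List Char) : ∀ (out : List Char) (seen after : Bool),
    out.length < 100 →
    pvLoopB cs out seen after = (out ++ pvEmit cs seen after).take 100 := by
  induction cs with
  | nil =>
    intro out seen after hr
    simp [pvLoopB, pvEmit, List.take_of_length_le (Nat.le_of_lt hr)]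
  | cons c rest ih =>
    intro out seen after hr
    by_cases hs : c = ' '
    · simp only [pvLoopB, pvEmit, hs, if_pos]
      exact ih out seen seen hr
    · by_cases ha : PySem.Chars.isalpha c = true
      · simp only [pvLoopB, pvEmit, hs, ha, if_false, if_true]
        set ch := if after = true then PySem.Chars.upperChar c else PySem.Chars.lowerChar c with hch
        by_cases hd : (out ++ [ch]).length = 100
        · rw [if_pos hd]
          have : out ++ ch :: pvEmit rest true false = (out ++ [ch]) ++ pvEmit rest true false := by simp
          rw [this, List.take_append_of_le_length (by omega), List.take_of_length_le (by omega)]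
        · rw [if_neg hd]
          have hlt : (out ++ [ch]).length < 100 := by simp at hd ⊢; omega
          rw [ih _ true false hlt]
          simp
      · simp only [pvLoopB, pvEmit, hs, ha]
        simp only [Bool.false_eq_true, if_false]
        exact ih out true false hr

-- ---- characterize splitOn on a single-space separator by a structural recursion ----
def pvSplit (cs : List Char) : List (List Char) :=
  match cs with
  | [] => [[]]
  | c :: rest =>
    if c = ' ' then [] :: pvSplit rest
    else
      match pvSplit rest with
      | [] => [[c]]
      | w :: ws => (c :: w) :: ws

def pvConsHead (p : List Char) (ws : List (List Char)) : List (List Char) :=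
  match ws with
  | [] => [p]
  | w :: t => (p ++ w) :: t

theorem pvSplit_ne_nil (cs : List Char) : pvSplit cs ≠ [] := by
  cases cs with
  | nil => simp [pvSplit]
  | cons c rest =>
    simp only [pvSplit]
    split
    · simp
    · cases h : pvSplit rest <;> simp

theorem pvConsHead_assoc (a b : List Char) (ws : List (List Char)) :
    pvConsHead a (pvConsHead b ws) = pvConsHead (a ++ b) ws := by
  cases ws <;> simp [pvConsHead]

theorem pvSplitGo_eq (l : List Char) : ∀ (fuel : Nat) (cur : List Char) (acc : List (List Char)),
    l.length < fuel →
    PySem.Chars.splitOn.go [' '] fuel l cur acc = acc.reverse ++ pvConsHead cur.reverse (pvSplit l) := by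
  induction l with
  | nil =>
    intro fuel cur acc hf
    cases fuel with
    | zero => omega
    | succ f => simp [PySem.Chars.splitOn.go, pvSplit, pvConsHead]
  | cons c rest ih =>
    intro fuel cur acc hf
    cases fuel with
    | zero => omega
    | succ f =>
      by_cases hs : c = ' '
      · have hp : List.isPrefixOf [' '] (c :: rest) = true := by simp [List.isPrefixOf, hs]
        simp only [PySem.Chars.splitOn.go, hp, if_pos]
        have : List.drop [' '].length (c :: rest) = rest := by simp
        rw [this, ih f [] (cur.reverse :: acc) (by simp at hf; omega)]
        have hsp : pvSplit (c :: rest) = [] :: pvSplit rest := by simp [pvSplit, hs]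
        rw [hsp]
        cases h : pvSplit rest with
        | nil => exact absurd h (pvSplit_ne_nil rest)
        | cons w ws => simp [pvConsHead]
      · have hp : List.isPrefixOf [' '] (c :: rest) = false := by
          simp [List.isPrefixOf]; exact fun h => hs h.symm
        simp only [PySem.Chars.splitOn.go, hp, Bool.false_eq_true, if_false]
        rw [ih f (c :: cur) acc (by simp at hf; omega)]
        have h1 : (c :: cur).reverse = cur.reverse ++ [c] := by simp
        rw [h1, ← pvConsHead_assoc]
        congr 1
        simp only [pvSplit, hs, ite_false]
        cases h : pvSplit rest with
        | nil => exact absurd h (pvSplit_ne_nil rest)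
        | cons w ws => simp [pvConsHead]

theorem pvSplitOn_eq (cs : List Char) : PySem.Chars.splitOn cs [' '] = pvSplit cs := by
  show PySem.Chars.splitOn.go [' '] (cs.length + 1) cs [] [] = _
  rw [pvSplitGo_eq cs (cs.length + 1) [] [] (by omega)]
  cases h : pvSplit cs with
  | nil => exact absurd h (pvSplit_ne_nil cs)
  | cons w ws => simp [pvConsHead]

-- ---- the emitted stream equals A's per-word fragments ----
-- word fragment with the first position-0 alpha char uppercased (= fragAux for any i ≥ 1)
theorem pvFragAux_pos (i : Int) (hi : 1 ≤ i) (w : List Char) :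
    pvFragAux i 0 w = pvFragAux 1 0 w := by
  cases w with
  | nil => rfl
  | cons c rest =>
    simp only [pvFragAux, pvFragAux_succ]
    have h0 : (0 : Int) < i := by omega
    simp [h0]

theorem pvEnumFlat (ws : List (List Char)) : ∀ i : Int, 1 ≤ i →
    (PySem.List.enumerate ws i).flatMap (fun p => pvFragAux p.1 0 p.2)
      = ws.flatMap (fun w => pvFragAux 1 0 w) := by
  induction ws with
  | nil => intro i hi; simp [PySem.List.enumerate_nil]
  | cons w rest ih =>
    intro i hi
    rw [PySem.List.enumerate_cons]
    simp only [List.flatMap_cons]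
    rw [ih (i + 1) (by omega), pvFragAux_pos i hi]

def pvHFlat (ws : List (List Char)) : List Char :=
  match ws with
  | [] => []
  | w :: t => pvFrag w ++ t.flatMap (fun w => pvFragAux 1 0 w)

theorem pvEmit_split (s : List Char) :
    pvEmit s true true = (pvSplit s).flatMap (fun w => pvFragAux 1 0 w)
    ∧ pvEmit s true false = pvHFlat (pvSplit s) := by
  induction s with
  | nil => constructor <;> simp [pvEmit, pvSplit, pvHFlat, pvFragAux, pvFrag]
  | cons c rest ih =>
    by_cases hs : c = ' '
    · constructor
      · simp only [pvEmit, pvSplit, hs, if_pos, List.flatMap_cons]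
        rw [ih.1]; simp [pvFragAux]
      · simp only [pvEmit, pvSplit, hs, if_pos]
        rw [ih.1]; simp [pvHFlat, pvFrag]
    · obtain ⟨w0, ws, hw⟩ : ∃ w0 ws, pvSplit rest = w0 :: ws := by
        cases h : pvSplit rest with
        | nil => exact absurd h (pvSplit_ne_nil rest)
        | cons w ws => exact ⟨w, ws, rfl⟩
      have hsplit : pvSplit (c :: rest) = (c :: w0) :: ws := by
        simp [pvSplit, hs, hw]
      by_cases ha : PySem.Chars.isalpha c = true
      · constructor
        · simp only [pvEmit, hs, ha, ite_false, if_pos, hsplit, List.flatMap_cons]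
          rw [ih.2, hw]
          simp [pvHFlat, pvFragAux, ha, pvFragAux_succ]
        · simp only [pvEmit, hs, ha, ite_false, if_pos, hsplit]
          rw [ih.2, hw]
          simp [pvHFlat, pvFrag, ha]
      · constructor
        · simp only [pvEmit, hs, ha, Bool.false_eq_true, if_false, hsplit,
            List.flatMap_cons]
          rw [ih.2, hw]
          simp [pvHFlat, pvFragAux, ha, pvFragAux_succ]
        · simp only [pvEmit, hs, ha, Bool.false_eq_true, if_false, hsplit]
          rw [ih.2, hw]
          simp [pvHFlat, pvFrag, ha]

-- top: on a string with no leading space the stream equals A's enumerated-word fragments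
theorem pvEmit_top (s : List Char) (h : ∀ c t, s = c :: t → c ≠ ' ') :
    pvEmit s false false
      = (PySem.List.enumerate (pvSplit s) 0).flatMap (fun p => pvFragAux p.1 0 p.2) := by
  cases s with
  | nil => simp [pvEmit, pvSplit, PySem.List.enumerate_cons, PySem.List.enumerate_nil, pvFragAux]
  | cons c rest =>
    have hs : c ≠ ' ' := h c rest rfl
    obtain ⟨w0, ws, hw⟩ : ∃ w0 ws, pvSplit rest = w0 :: ws := by
      cases hx : pvSplit rest with
      | nil => exact absurd hx (pvSplit_ne_nil rest)
      | cons w ws => exact ⟨w, ws, rfl⟩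
    have hsplit : pvSplit (c :: rest) = (c :: w0) :: ws := by simp [pvSplit, hs, hw]
    rw [hsplit, PySem.List.enumerate_cons]
    simp only [List.flatMap_cons]
    rw [pvEnumFlat ws (0+1) (by omega)]
    have hfa : pvFragAux 0 0 (c :: w0) = pvFrag (c :: w0) := by
      simp only [pvFragAux, pvFragAux_succ, pvFrag]
      by_cases ha : PySem.Chars.isalpha c = true <;> simp [ha]
    rw [hfa]
    by_cases ha : PySem.Chars.isalpha c = true
    · simp only [pvEmit, hs, ha, ite_false, if_pos]
      rw [(pvEmit_split rest).2, hw]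
      simp [pvHFlat, pvFrag, ha]
    · simp only [pvEmit, hs, ha, Bool.false_eq_true, if_false]
      rw [(pvEmit_split rest).2, hw]
      simp [pvHFlat, pvFrag, ha]

-- ---- strip invariance of the stream ----
theorem pvEmit_lstrip (cs : List Char) : pvEmit cs false false = pvEmit (pvLstripSp cs) false false := by
  induction cs with
  | nil => rfl
  | cons c rest ih =>
    by_cases hs : c = ' '
    · simp only [pvEmit, pvLstripSp, hs, if_pos, List.dropWhile_cons, beq_self_eq_true]
      exact ih
    · simp [pvLstripSp, hs]

theorem pvEmit_spaces (zs : List Char) (hz : ∀ c ∈ zs, c = ' ') :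
    ∀ seen after, pvEmit zs seen after = [] := by
  induction zs with
  | nil => intro seen after; rfl
  | cons c rest ih =>
    intro seen after
    have : c = ' ' := hz c (by simp)
    simp only [pvEmit, this, if_pos]
    exact ih (fun c hc => hz c (by simp [hc])) seen seen

theorem pvEmit_append_spaces (xs : List Char) : ∀ (zs : List Char), (∀ c ∈ zs, c = ' ') →
    ∀ seen after, pvEmit (xs ++ zs) seen after = pvEmit xs seen after := by
  induction xs with
  | nil => intro zs hz seen after; simp [pvEmit, pvEmit_spaces zs hz]
  | cons c rest ih =>
    intro zs hz seen after
    by_cases hs : c = ' '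
    · simp only [List.cons_append, pvEmit, hs, if_pos]
      exact ih zs hz seen seen
    · by_cases ha : PySem.Chars.isalpha c = true
      · simp only [List.cons_append, pvEmit, hs, ha, ite_false, if_pos]
        rw [ih zs hz true false]
      · simp only [List.cons_append, pvEmit, hs, ha, Bool.false_eq_true, if_false]
        exact ih zs hz true false

theorem pvRstrip_decomp (xs : List Char) :
    ∃ zs, (∀ c ∈ zs, c = ' ') ∧ xs = pvRstripSp xs ++ zs := by
  refine ⟨(xs.reverse.takeWhile (· == ' ')).reverse, ?_, ?_⟩
  · intro c hc
    rw [List.mem_reverse] at hc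
    have := List.mem_takeWhile_imp hc
    simpa using this
  · simp only [pvRstripSp]
    rw [← List.reverse_append, List.takeWhile_append_dropWhile, List.reverse_reverse]

theorem pvRstrip_no_lead (cs : List Char) :
    ∀ c t, pvRstripSp (pvLstripSp cs) = c :: t → c ≠ ' ' := by
  intro c t h hc
  have hpre : pvRstripSp (pvLstripSp cs) <+: pvLstripSp cs := by
    have hsuf : ((pvLstripSp cs).reverse.dropWhile (· == ' ')) <:+ (pvLstripSp cs).reverse :=
      List.dropWhile_suffix _
    have := List.reverse_prefix.mpr hsuf
    simpa [pvRstripSp] using this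
  obtain ⟨t2, ht2⟩ := hpre
  rw [h] at ht2
  subst hc
  have : pvLstripSp cs = ' ' :: (t ++ t2) := by rw [← ht2]; simp
  have hhead := List.head?_dropWhile_not (p := (· == ' ')) (l := cs)
  rw [show cs.dropWhile (· == ' ') = pvLstripSp cs from rfl, this] at hhead
  simp at hhead

-- ---- put it together ----
theorem generateTag_spec_aux (caption : String) : generateTag caption = generateTag_alt caption := by
  simp only [generateTag, generateTag_alt]
  congr 1
  rw [pvOuterA_eq _ ['#'] (by decide), pvLoopB_eq _ ['#'] false false (by decide)]
  congr 2
  rw [pvSplitOn_eq]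
  set stripped := pvRstripSp (pvLstripSp caption.toList) with hstr
  rw [pvEmit_lstrip]
  obtain ⟨zs, hz, hdec⟩ := pvRstrip_decomp (pvLstripSp caption.toList)
  conv_rhs => rw [hdec]
  rw [pvEmit_append_spaces _ zs hz false false]
  exact (pvEmit_top stripped (pvRstrip_no_lead caption.toList)).symm

-- ===== VERDICT (by name: the statement is the Claim_ definition above) =====
theorem generateTag_spec : Claim_equal_generateTag := by
  intro caption _
  unfold Spec_generateTag
  exact generateTag_spec_aux caption
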